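-- pv_equiv track=rewrite | github.com/enaix/SuperCFG | format_template_inst.py | count_template_params
-- ===== SOURCE A (Python) =====
-- def count_template_params(text, start_pos):
--     """Count the number of template parameters starting from a '<' character."""
--     depth = 0
--     param_count = 0
--     i = start_pos
--
--     while i < len(text):
--         char = text[i]
--
--         if char == '<':
--             if depth == 0:
--                 param_count = 1  # at least one parameter
--             depth += 1
--         elif char == '>':
--             depth -= 1
--             if depth == 0:
--                 segment = text[start_pos:i + 1]
--                 if segment.strip() == '<>':
--                     return 0
--                 return param_count
--         elif char == ',' and depth == 1:
--             param_count += 1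
--
--         i += 1
--
--     return param_count
-- ===== SOURCE B (Python) =====
-- def count_template_params(text, start_pos):
--     """Count the number of template parameters starting from a '<' character."""
--     n = len(text)
--     # Phase 1: locate the '>' that brings the bracket depth back to 0 (or n if none).
--     depth = 0
--     close = n
--     i = start_pos
--     while i < n:
--         c = text[i]
--         if c == '<':
--             depth += 1
--         elif c == '>':
--             depth -= 1
--             if depth == 0:
--                 close = i
--                 break
--         i += 1
--     # Phase 2: empty '<>' span, or 1 + commas at depth 1 within the span (0 if never opened).
--     if close < n and text[start_pos:close + 1].strip() == '<>':
--         return 0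
--     depth = 0
--     opened = False
--     count = 0
--     for j in range(start_pos, close):
--         c = text[j]
--         if c == '<':
--             if depth == 0:
--                 opened = True
--             depth += 1
--         elif c == '>':
--             depth -= 1
--         elif c == ',' and depth == 1:
--             count += 1
--     return 1 + count if opened else 0
-- ===== Notes on version B (the rewrite author's own statement) =====
-- stated objective: alternative
-- what changed: Two-phase decomposition: a first scan only locates the closing '>' (or end of text), then the parameter count is derived separately as 1 plus the depth-1 commas over that fixed span (with the '<>'-span check done once up front), instead of A's single loop that interleaves counting, the empty-span check and early return.
import Mathlib
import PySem

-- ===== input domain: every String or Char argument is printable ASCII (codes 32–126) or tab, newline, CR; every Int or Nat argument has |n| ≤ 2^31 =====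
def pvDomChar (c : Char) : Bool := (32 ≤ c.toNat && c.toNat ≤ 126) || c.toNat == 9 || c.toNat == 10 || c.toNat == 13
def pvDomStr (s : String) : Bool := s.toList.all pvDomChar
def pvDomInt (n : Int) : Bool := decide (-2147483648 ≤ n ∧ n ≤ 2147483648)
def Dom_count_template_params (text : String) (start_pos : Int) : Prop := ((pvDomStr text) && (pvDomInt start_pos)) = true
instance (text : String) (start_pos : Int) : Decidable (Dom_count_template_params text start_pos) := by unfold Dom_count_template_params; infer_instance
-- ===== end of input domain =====

-- B re-decomposes A's single counting loop into two phases (locate the closing '>', then count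
-- depth-1 commas over that fixed span); same O(n) cost, objective: alternative decomposition.

-- ===== PORT A =====
-- A's while-loop: state (i, depth, param_count); early returns inside the loop.
def ctpLoopA (cs : List Char) (start i depth param : Int) : Int :=
  if _h : i < (cs.length : Int) then
    match PySem.List.pyGet? cs i with
    | none => 0  -- Python raises IndexError here (i < -len); excluded by Pre_
    | some c =>
      if c = '<' then
        ctpLoopA cs start (i + 1) (depth + 1) (if depth = 0 then 1 else param)
      else if c = '>' then
        if depth - 1 = 0 then
          if PySem.Chars.strip (PySem.List.slice cs (some start) (some (i + 1))) = ['<', '>'] then 0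
          else param
        else ctpLoopA cs start (i + 1) (depth - 1) param
      else if c = ',' ∧ depth = 1 then ctpLoopA cs start (i + 1) depth (param + 1)
      else ctpLoopA cs start (i + 1) depth param
  else param
termination_by ((cs.length : Int) - i).toNat
decreasing_by all_goals omega

def count_template_params (text : String) (start_pos : Int) : Int :=
  ctpLoopA text.toList start_pos start_pos 0 0

-- ===== PORT B =====
-- Phase 1 of Source B: index of the '>' closing the depth back to 0, or len if none.
def ctpFindClose (cs : List Char) (i depth : Int) : Int :=
  if _h : i < (cs.length : Int) then
    match PySem.List.pyGet? cs i with
    | none => (cs.length : Int)  -- Python raises IndexError here; excluded by Pre_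
    | some c =>
      if c = '<' then ctpFindClose cs (i + 1) (depth + 1)
      else if c = '>' then
        if depth - 1 = 0 then i else ctpFindClose cs (i + 1) (depth - 1)
      else ctpFindClose cs (i + 1) depth
  else (cs.length : Int)
termination_by ((cs.length : Int) - i).toNat
decreasing_by all_goals omega

-- Phase 2 of Source B: the for-loop over range(start_pos, close) with state (depth, opened, count).
def ctpCount (cs : List Char) (i stop depth : Int) (opened : Bool) (count : Int) : Int :=
  if _h : i < stop then
    match PySem.List.pyGet? cs i with
    | none => if opened then 1 + count else 0  -- Python raises IndexError here; excluded by Pre_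
    | some c =>
      if c = '<' then
        ctpCount cs (i + 1) stop (depth + 1) (if depth = 0 then true else opened) count
      else if c = '>' then ctpCount cs (i + 1) stop (depth - 1) opened count
      else if c = ',' ∧ depth = 1 then ctpCount cs (i + 1) stop depth opened (count + 1)
      else ctpCount cs (i + 1) stop depth opened count
  else if opened then 1 + count else 0
termination_by (stop - i).toNat
decreasing_by all_goals omega

def count_template_params_alt (text : String) (start_pos : Int) : Int :=
  let cs := text.toList
  let n : Int := (cs.length : Int)
  let close := ctpFindClose cs start_pos 0
  if close < n ∧ PySem.Chars.strip (PySem.List.slice cs (some start_pos) (some (close + 1))) = ['<', '>'] then 0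
  else ctpCount cs start_pos close 0 false 0

-- ===== PRECONDITION & SPEC =====
-- Pre_ excludes exactly the inputs on which Python A raises IndexError: start_pos < -len(text)
-- (the loop is entered with a negative index below -len).
def Pre_count_template_params (text : String) (start_pos : Int) : Prop :=
  -(text.toList.length : Int) ≤ start_pos
instance (text : String) (start_pos : Int) : Decidable (Pre_count_template_params text start_pos) := by
  unfold Pre_count_template_params; infer_instance

def pvWitness_count_template_params : String × Int := ("<a,b>", 0)

def Spec_count_template_params (text : String) (start_pos : Int) (out : Int) : Prop := out = count_template_params_alt text start_pos
instance (text : String) (start_pos : Int) (out : Int) : Decidable (Spec_count_template_params text start_pos out) := by unfold Spec_count_template_params; infer_instance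

-- ===== CLAIM (what is proved, stated in full; the proofs are below) =====
def Claim_equal_count_template_params : Prop := ∀ (text : String) (start_pos : Int), Dom_count_template_params text start_pos → Pre_count_template_params text start_pos → Spec_count_template_params text start_pos (count_template_params text start_pos)

-- ===== LEMMAS AND PROOFS =====

-- In range, text[i] never raises.
lemma ctp_get_some (cs : List Char) (i : Int) (h0 : -(cs.length : Int) ≤ i)
    (h1 : i < (cs.length : Int)) : ∃ c, PySem.List.pyGet? cs i = some c := by
  cases hg : PySem.List.pyGet? cs i with
  | none =>
    rw [PySem.List.pyGet?_eq_none_iff] at hg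
    exact absurd ⟨h0, h1⟩ hg
  | some c => exact ⟨c, rfl⟩

-- ctpFindClose never points before its starting index (when that index is in the text).
lemma ctpFindClose_lb (cs : List Char) :
    ∀ (k : Nat) (i depth : Int), ((cs.length : Int) - i).toNat = k →
      i ≤ (cs.length : Int) → i ≤ ctpFindClose cs i depth := by
  intro k
  induction k using Nat.strong_induction_on with
  | _ k ih =>
    intro i depth hk hi
    rw [ctpFindClose]
    split
    · next h =>
      cases hg : PySem.List.pyGet? cs i with
      | none => simp; omega
      | some c =>
        simp only [hg]
        have hstep : ∀ d : Int, i ≤ ctpFindClose cs (i + 1) d := by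
          intro d
          have := ih (((cs.length : Int) - (i + 1)).toNat) (by omega) (i + 1) d rfl (by omega)
          omega
        split_ifs <;> first | omega | exact hstep _
    · next h => omega

-- The heart of the equivalence: from any loop state of A satisfying the state invariant,
-- A's loop computes exactly B's two-phase continuation from the same position.
lemma ctp_main (cs : List Char) (start : Int) :
    ∀ (k : Nat) (i depth param : Int) (opened : Bool) (count : Int),
      ((cs.length : Int) - i).toNat = k →
      -(cs.length : Int) ≤ i →
      (opened = false → param = 0 ∧ depth ≤ 0 ∧ count = 0) →
      (opened = true → param = 1 + count ∧ 1 ≤ depth) →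
      ctpLoopA cs start i depth param =
        (if ctpFindClose cs i depth < (cs.length : Int) ∧
            PySem.Chars.strip (PySem.List.slice cs (some start) (some (ctpFindClose cs i depth + 1))) = ['<', '>']
         then 0
         else ctpCount cs i (ctpFindClose cs i depth) depth opened count) := by
  intro k
  induction k using Nat.strong_induction_on with
  | _ k ih =>
    intro i depth param opened count hk hlo hinv0 hinv1
    by_cases hlt : i < (cs.length : Int)
    · obtain ⟨c, hg⟩ := ctp_get_some cs i hlo hlt
      have hfc1 : ∀ d : Int, i < ctpFindClose cs (i + 1) d := by
        intro d
        have := ctpFindClose_lb cs (((cs.length : Int) - (i + 1)).toNat) (i + 1) d rfl (by omega)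
        omega
      have hIH : ∀ (depth' param' : Int) (opened' : Bool) (count' : Int),
          (opened' = false → param' = 0 ∧ depth' ≤ 0 ∧ count' = 0) →
          (opened' = true → param' = 1 + count' ∧ 1 ≤ depth') →
          ctpLoopA cs start (i + 1) depth' param' =
            (if ctpFindClose cs (i + 1) depth' < (cs.length : Int) ∧
                PySem.Chars.strip (PySem.List.slice cs (some start) (some (ctpFindClose cs (i + 1) depth' + 1))) = ['<', '>']
             then 0
             else ctpCount cs (i + 1) (ctpFindClose cs (i + 1) depth') depth' opened' count') := by
        intro depth' param' opened' count' h0 h1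
        exact ih (((cs.length : Int) - (i + 1)).toNat) (by omega) (i + 1) depth' param' opened' count' rfl (by omega) h0 h1
      by_cases hc1 : c = '<'
      · -- '<' : depth increases; param set to 1 iff depth = 0 (then opened flips to true)
        have hA : ctpLoopA cs start i depth param
            = ctpLoopA cs start (i + 1) (depth + 1) (if depth = 0 then 1 else param) := by
          rw [ctpLoopA]; simp [hlt, hg, hc1]
        have hF : ctpFindClose cs i depth = ctpFindClose cs (i + 1) (depth + 1) := by
          rw [ctpFindClose]; simp [hlt, hg, hc1]
        have hC : ctpCount cs i (ctpFindClose cs (i + 1) (depth + 1)) depth opened count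
            = ctpCount cs (i + 1) (ctpFindClose cs (i + 1) (depth + 1)) (depth + 1)
                (if depth = 0 then true else opened) count := by
          rw [ctpCount]; simp [hfc1 (depth + 1), hg, hc1]
        rw [hA, hF, hC]
        by_cases hd : depth = 0
        · have hop : opened = false := by
            cases opened
            · rfl
            · exact absurd (hinv1 rfl).2 (by omega)
          obtain ⟨hp, _, hcnt⟩ := hinv0 hop
          subst hd
          exact hIH (0 + 1) 1 true count
            (by intro h; cases h) (by intro _; constructor <;> omega)
        · simp only [if_neg hd]
          refine hIH (depth + 1) param opened count ?_ ?_
          · intro h; obtain ⟨hp, hdl, hcnt⟩ := hinv0 h; exact ⟨hp, by omega, hcnt⟩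
          · intro h; obtain ⟨hp, hdl⟩ := hinv1 h; exact ⟨hp, by omega⟩
      · by_cases hc2 : c = '>'
        · by_cases hd : depth - 1 = 0
          · -- closing '>' found: both sides decide on the stripped segment
            have hop : opened = true := by
              cases opened
              · exact absurd (hinv0 rfl).2.1 (by omega)
              · rfl
            obtain ⟨hp, _⟩ := hinv1 hop
            have hA : ctpLoopA cs start i depth param
                = (if PySem.Chars.strip (PySem.List.slice cs (some start) (some (i + 1))) = ['<', '>'] then 0 else param) := by
              rw [ctpLoopA]; simp [hlt, hg, hc2, hd]
            have hF : ctpFindClose cs i depth = i := by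
              rw [ctpFindClose]; simp [hlt, hg, hc2, hd]
            rw [hA, hF]
            have hCnt : ctpCount cs i i depth opened count = 1 + count := by
              rw [ctpCount]; simp [hop]
            by_cases hs : PySem.Chars.strip (PySem.List.slice cs (some start) (some (i + 1))) = ['<', '>']
            · simp [hs, hlt]
            · simp [hs, hCnt, hp]
          · -- non-closing '>' : depth decreases on both sides
            have hA : ctpLoopA cs start i depth param
                = ctpLoopA cs start (i + 1) (depth - 1) param := by
              rw [ctpLoopA]; simp [hlt, hg, hc2, hd]
            have hF : ctpFindClose cs i depth = ctpFindClose cs (i + 1) (depth - 1) := by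
              rw [ctpFindClose]; simp [hlt, hg, hc2, hd]
            have hC : ctpCount cs i (ctpFindClose cs (i + 1) (depth - 1)) depth opened count
                = ctpCount cs (i + 1) (ctpFindClose cs (i + 1) (depth - 1)) (depth - 1) opened count := by
              rw [ctpCount]; simp [hfc1 (depth - 1), hg, hc1, hc2]
            rw [hA, hF, hC]
            refine hIH (depth - 1) param opened count ?_ ?_
            · intro h; obtain ⟨hp, hdl, hcnt⟩ := hinv0 h; exact ⟨hp, by omega, hcnt⟩
            · intro h; obtain ⟨hp, hdl⟩ := hinv1 h; exact ⟨hp, by omega⟩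
        · by_cases hc3 : c = ',' ∧ depth = 1
          · -- a depth-1 comma: param and count both increase
            have hop : opened = true := by
              cases opened
              · exact absurd (hinv0 rfl).2.1 (by omega)
              · rfl
            obtain ⟨hp, hdl⟩ := hinv1 hop
            have hA : ctpLoopA cs start i depth param
                = ctpLoopA cs start (i + 1) depth (param + 1) := by
              rw [ctpLoopA]; simp [hlt, hg, hc1, hc2, hc3]
            have hF : ctpFindClose cs i depth = ctpFindClose cs (i + 1) depth := by
              rw [ctpFindClose]; simp [hlt, hg, hc1, hc2, hc3.2]
            have hC : ctpCount cs i (ctpFindClose cs (i + 1) depth) depth opened count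
                = ctpCount cs (i + 1) (ctpFindClose cs (i + 1) depth) depth opened (count + 1) := by
              rw [ctpCount]; simp [hfc1 1, hfc1 depth, hg, hc1, hc2, hc3]
            rw [hA, hF, hC]
            exact hIH depth (param + 1) opened (count + 1)
              (by intro h; rw [h] at hop; cases hop) (by intro _; constructor <;> omega)
          · -- any other character: everything unchanged
            have hA : ctpLoopA cs start i depth param
                = ctpLoopA cs start (i + 1) depth param := by
              rw [ctpLoopA]; simp [hlt, hg, hc1, hc2, hc3]
            have hF : ctpFindClose cs i depth = ctpFindClose cs (i + 1) depth := by
              rw [ctpFindClose]; simp [hlt, hg, hc1, hc2]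
            have hC : ctpCount cs i (ctpFindClose cs (i + 1) depth) depth opened count
                = ctpCount cs (i + 1) (ctpFindClose cs (i + 1) depth) depth opened count := by
              rw [ctpCount]; simp [hfc1 depth, hg, hc1, hc2, hc3]
            rw [hA, hF, hC]
            exact hIH depth param opened count hinv0 hinv1
    · -- i beyond the text: A returns param, phase 1 returns len, phase 2 the folded param
      have hA : ctpLoopA cs start i depth param = param := by
        rw [ctpLoopA]; simp [hlt]
      have hF : ctpFindClose cs i depth = (cs.length : Int) := by
        rw [ctpFindClose]; simp [hlt]
      have hC : ctpCount cs i (cs.length : Int) depth opened count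
          = (if opened then 1 + count else 0) := by
        rw [ctpCount]; simp [hlt]
      rw [hA, hF, hC]
      cases opened
      · simp [(hinv0 rfl).1]
      · obtain ⟨hp, _⟩ := hinv1 rfl
        simp [hp]

-- ===== VERDICT (by name: the statement is the Claim_ definition above) =====
theorem count_template_params_spec : Claim_equal_count_template_params := by
  intro text start_pos _hdom hpre
  unfold Spec_count_template_params count_template_params count_template_params_alt
  have := ctp_main text.toList start_pos (((text.toList.length : Int) - start_pos).toNat)
    start_pos 0 0 false 0 rfl hpre
    (by intro _; exact ⟨rfl, le_refl _, rfl⟩) (by intro h; cases h)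
  simpa using this
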